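-- pv_equiv track=rewrite | github.com/crapas1974/algo2 | memoization/smart_mouse_recursive.py | sm_min_time_recursive
-- ===== SOURCE A (Python) =====
-- def sm_min_time_recursive(i, j, t):
--     try:
--         if i == j:
--             return 0
--         elif i + 1 == j:
--             return t[i][j]
--         min_time = t[i][j]
--         for k in range(i + 1, j):
--             min_time = min(min_time, sm_min_time_recursive(i, k, t) + sm_min_time_recursive(k, j, t))
--         return min_time
--     except IndexError:
--         return None
-- ===== SOURCE B (Python) =====
-- def sm_min_time_recursive(i, j, t):
--     # Bottom-up interval DP (tabulation by gap) instead of A's exponential recursion.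
--     if i == j:
--         return 0
--     try:
--         if j <= i + 1:
--             return t[i][j]
--         cost = {}
--         for g in range(1, j - i + 1):
--             for a in range(i, j - g + 1):
--                 b = a + g
--                 best = t[a][b]
--                 for k in range(a + 1, b):
--                     best = min(best, cost[(a, k)] + cost[(k, b)])
--                 cost[(a, b)] = best
--         return cost[(i, j)]
--     except IndexError:
--         return None
-- ===== Notes on version B (the rewrite author's own statement) =====
-- stated objective: faster
-- what changed: replaces A's exponential top-down recursion over all split points with a bottom-up interval-DP table filled in order of increasing gap, so each subinterval is computed once
import Mathlib
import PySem

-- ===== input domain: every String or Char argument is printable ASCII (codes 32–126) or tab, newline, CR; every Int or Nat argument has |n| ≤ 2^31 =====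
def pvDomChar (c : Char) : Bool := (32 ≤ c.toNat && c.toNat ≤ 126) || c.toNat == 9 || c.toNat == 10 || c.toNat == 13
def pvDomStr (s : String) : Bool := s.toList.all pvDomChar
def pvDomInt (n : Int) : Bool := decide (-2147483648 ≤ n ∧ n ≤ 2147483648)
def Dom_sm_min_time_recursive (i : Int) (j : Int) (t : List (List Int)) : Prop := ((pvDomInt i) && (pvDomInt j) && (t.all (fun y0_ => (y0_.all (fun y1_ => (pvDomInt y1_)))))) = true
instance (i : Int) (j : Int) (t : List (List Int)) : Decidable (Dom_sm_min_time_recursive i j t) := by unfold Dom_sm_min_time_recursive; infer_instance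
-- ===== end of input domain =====

-- B replaces A's exponential top-down recursion over split points with a bottom-up
-- interval-DP table filled by increasing gap (objective: faster, asymptotic).

-- shared helper: t[a][b] (Python indexing, incl. negative wraparound); none = IndexError
def pvGet2 (t : List (List Int)) (a b : Int) : Option Int :=
  (PySem.List.pyGet? t a).bind fun row => PySem.List.pyGet? row b

-- ===== PORT A =====
-- none models both the caught IndexError (→ Python None) and, in the recursive step,
-- the uncaught TypeError of 'None + int'; exact on Pre_, which excludes the TypeError inputs.
def sm_min_time_recursive (i : Int) (j : Int) (t : List (List Int)) : Option Int :=
  if i = j then some 0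
  else if i + 1 = j then pvGet2 t i j
  else
    match pvGet2 t i j with
    | none => none
    | some m0 =>
      (PySem.List.pyRange (i + 1) j 1).attach.foldl
        (fun acc k =>
          acc.bind fun m =>
            match sm_min_time_recursive i k.1 t, sm_min_time_recursive k.1 j t with
            | some x, some y => some (min m (x + y))
            | _, _ => none)
        (some m0)
termination_by (j - i).toNat
decreasing_by
  · have h := PySem.List.mem_pyRange_one.1 k.2; omega
  · have h := PySem.List.mem_pyRange_one.1 k.2; omega

-- ===== PORT B =====
-- one DP cell: best = t[a][b]; for k in range(a+1,b): best = min(best, cost[(a,k)] + cost[(k,b)])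
-- (none models an exception: IndexError on t[a][b] / KeyError on a missing cost entry;
-- the two lookups are sequenced exactly as Python evaluates them)
def pvCell (t : List (List Int)) (cost : PySem.Dict (Int × Int) Int) (a b : Int) : Option Int :=
  (pvGet2 t a b).bind fun t0 =>
    (PySem.List.pyRange (a + 1) b 1).foldl
      (fun acc k =>
        acc.bind fun best =>
          (cost.get? (a, k)).bind fun x =>
            (cost.get? (k, b)).bind fun y =>
              some (min best (x + y)))
      (some t0)

-- inner loop 'for a in range(a0, j - g + 1)': fill cost[(a, a+g)], abort on exception (none)
def pvInnerLoop (t : List (List Int)) (g jg1 : Int) (a : Int)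
    (cost : PySem.Dict (Int × Int) Int) : Option (PySem.Dict (Int × Int) Int) :=
  if a < jg1 then
    match pvCell t cost a (a + g) with
    | none => none
    | some v => pvInnerLoop t g jg1 (a + 1) (cost.insert (a, a + g) v)
  else some cost
termination_by (jg1 - a).toNat
decreasing_by omega

-- outer loop 'for g in range(g0, j - i + 1)', aborting on exception (none)
def pvOuterLoop (t : List (List Int)) (i j g : Int)
    (cost : PySem.Dict (Int × Int) Int) : Option (PySem.Dict (Int × Int) Int) :=
  if g < j - i + 1 then
    match pvInnerLoop t g (j - g + 1) i cost with
    | none => none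
    | some cost' => pvOuterLoop t i j (g + 1) cost'
  else some cost
termination_by (j - i + 1 - g).toNat
decreasing_by omega

def sm_min_time_recursive_alt (i : Int) (j : Int) (t : List (List Int)) : Option Int :=
  if i = j then some 0
  else if j ≤ i + 1 then pvGet2 t i j
  else
    match pvOuterLoop t i j 1 PySem.Dict.empty with
    | none => none
    | some cost => cost.get? (i, j)

-- ===== PRECONDITION & SPEC =====
-- Pre_ = exactly the inputs on which the Python A returns normally: it excludes only the inputs
-- where j ≥ i+2, t[i][j] is indexable, but some inner pair t[a][b] (i ≤ a < b ≤ j) is not —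
-- there an inner recursive call returns None and 'None + int' raises an uncaught TypeError.
def Pre_sm_min_time_recursive (i : Int) (j : Int) (t : List (List Int)) : Prop :=
  j ≤ i + 1 ∨ pvGet2 t i j = none ∨
    ∀ a ∈ PySem.List.pyRange i (j + 1) 1, ∀ b ∈ PySem.List.pyRange (a + 1) (j + 1) 1,
      pvGet2 t a b ≠ none
instance (i : Int) (j : Int) (t : List (List Int)) : Decidable (Pre_sm_min_time_recursive i j t) := by
  unfold Pre_sm_min_time_recursive; infer_instance

def pvWitness_sm_min_time_recursive : Int × Int × List (List Int) :=
  (0, 2, [[0, 3, 9], [0, 0, 4], [0, 0, 0]])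

def Spec_sm_min_time_recursive (i : Int) (j : Int) (t : List (List Int)) (out : Option Int) : Prop := out = sm_min_time_recursive_alt i j t
instance (i : Int) (j : Int) (t : List (List Int)) (out : Option Int) : Decidable (Spec_sm_min_time_recursive i j t out) := by unfold Spec_sm_min_time_recursive; infer_instance

-- ===== CLAIM (what is proved, stated in full; the proofs are below) =====
def Claim_equal_sm_min_time_recursive : Prop := ∀ (i : Int) (j : Int) (t : List (List Int)), Dom_sm_min_time_recursive i j t → Pre_sm_min_time_recursive i j t → Spec_sm_min_time_recursive i j t (sm_min_time_recursive i j t)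

-- ===== LEMMAS AND PROOFS =====

-- A's recursive step, with the attach stripped (List.foldl_attach)
lemma pvA_unfold (i j : Int) (t : List (List Int)) (h1 : i ≠ j) (h2 : i + 1 ≠ j) :
    sm_min_time_recursive i j t =
      match pvGet2 t i j with
      | none => none
      | some m0 =>
        (PySem.List.pyRange (i + 1) j 1).foldl
          (fun acc k =>
            acc.bind fun m =>
              match sm_min_time_recursive i k t, sm_min_time_recursive k j t with
              | some x, some y => some (min m (x + y))
              | _, _ => none)
          (some m0) := by
  rw [sm_min_time_recursive]
  simp only [if_neg h1, if_neg h2]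
  cases pvGet2 t i j with
  | none => rfl
  | some m0 =>
    show List.foldl _ _ _ = List.foldl _ _ _
    exact List.foldl_attach (f := fun acc k =>
      acc.bind fun m =>
        match sm_min_time_recursive i k t, sm_min_time_recursive k j t with
        | some x, some y => some (min m (x + y))
        | _, _ => none) (b := some m0) (l := PySem.List.pyRange (i + 1) j 1)

-- an Option-state fold whose step maps none to none stays none
lemma pvFoldl_none {α β : Type} (s : Option β → α → Option β)
    (h : ∀ x, s none x = none) : ∀ l : List α, l.foldl s none = none := by
  intro l; induction l with
  | nil => rfl
  | cons x xs ih => simp only [List.foldl_cons, h]; exact ih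

-- A's fold collapses to none as soon as one subcall is none
lemma pvA_fold_none (i j : Int) (t : List (List Int)) (k : Int)
    (hk : k ∈ PySem.List.pyRange (i + 1) j 1)
    (hnone : sm_min_time_recursive i k t = none ∨ sm_min_time_recursive k j t = none)
    (init : Option Int) :
    (PySem.List.pyRange (i + 1) j 1).foldl
      (fun acc k =>
        acc.bind fun m =>
          match sm_min_time_recursive i k t, sm_min_time_recursive k j t with
          | some x, some y => some (min m (x + y))
          | _, _ => none)
      init = none := by
  obtain ⟨l1, l2, hl⟩ := List.append_of_mem hk
  rw [hl, List.foldl_append, List.foldl_cons]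
  have hstep : ∀ acc : Option Int,
      (acc.bind fun m =>
        match sm_min_time_recursive i k t, sm_min_time_recursive k j t with
        | some x, some y => some (min m (x + y))
        | _, _ => none) = none := by
    intro acc
    cases acc with
    | none => rfl
    | some m =>
      rw [Option.bind_some]
      rcases hnone with h | h
      · rw [h]
      · rw [h]; cases sm_min_time_recursive i k t <;> rfl
  rw [hstep]
  exact pvFoldl_none _ (fun _ => rfl) l2

-- a none value anywhere inside [a,b] propagates up to (a,b)
lemma pvA_none_up (t : List (List Int)) :
    ∀ (n : ℕ) (a b x y : Int), (b - a).toNat ≤ n → a ≤ x → x < y → y ≤ b →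
      sm_min_time_recursive x y t = none → sm_min_time_recursive a b t = none := by
  intro n
  induction n with
  | zero => intro a b x y hn hax hxy hyb h; omega
  | succ n ih =>
    intro a b x y hn hax hxy hyb h
    by_cases hab : a = x ∧ b = y
    · rw [hab.1, hab.2]; exact h
    have hab2 : a + 2 ≤ b := by
      rcases (not_and_or.mp hab) with h' | h' <;> omega
    rw [pvA_unfold a b t (by omega) (by omega)]
    cases hg : pvGet2 t a b with
    | none => rfl
    | some m0 =>
      simp only
      by_cases hyb' : y < b
      · exact pvA_fold_none a b t y (PySem.List.mem_pyRange_one.2 (by omega))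
          (Or.inl (ih a y x y (by omega) hax hxy le_rfl h)) _
      · have hy : y = b := by omega
        subst hy
        have hx : a < x := by
          rcases (not_and_or.mp hab) with h' | h' <;> omega
        exact pvA_fold_none a y t x (PySem.List.mem_pyRange_one.2 (by omega))
          (Or.inr h) _

-- if the table already holds A's values for the splits of (a,b), the DP cell equals A
lemma pvCell_eq (t : List (List Int)) (cost : PySem.Dict (Int × Int) Int) (a b : Int)
    (hab : a < b)
    (hk : ∀ k : Int, a < k → k < b →
      cost.get? (a, k) = sm_min_time_recursive a k t ∧
      cost.get? (k, b) = sm_min_time_recursive k b t) :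
    pvCell t cost a b = sm_min_time_recursive a b t := by
  by_cases h2 : a + 1 = b
  · rw [sm_min_time_recursive]
    simp only [if_neg (by omega : ¬ a = b), if_pos h2]
    unfold pvCell
    rw [PySem.List.pyRange_one_eq_nil (by omega)]
    cases pvGet2 t a b <;> rfl
  · rw [pvA_unfold a b t (by omega) h2]
    unfold pvCell
    cases pvGet2 t a b with
    | none => rfl
    | some m0 =>
      simp only [Option.bind_some]
      apply PySem.List.foldl_congr_mem
      intro acc x hx
      have hx' := PySem.List.mem_pyRange_one.1 hx
      rw [(hk x (by omega) (by omega)).1, (hk x (by omega) (by omega)).2]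
      cases acc with
      | none => rfl
      | some m =>
        cases sm_min_time_recursive a x t <;> cases sm_min_time_recursive x b t <;> rfl

-- the inner loop (fixed gap g, a from a0 to j-g): either it extends the table to all
-- pairs of gap ≤ g, or it aborts with none and some pair inside [i,j] has A-value none
lemma pvInner (t : List (List Int)) (i j g : Int) (hg : 1 ≤ g) :
    ∀ (n : ℕ) (a0 : Int) (cost : PySem.Dict (Int × Int) Int),
      (j - g + 1 - a0).toNat ≤ n → i ≤ a0 →
      (∀ a b : Int, i ≤ a → a < b → b ≤ j → (b - a < g ∨ (b - a = g ∧ a < a0)) →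
        cost.get? (a, b) = sm_min_time_recursive a b t) →
      (∃ cost', pvInnerLoop t g (j - g + 1) a0 cost = some cost' ∧
        ∀ a b : Int, i ≤ a → a < b → b ≤ j → b - a ≤ g →
          cost'.get? (a, b) = sm_min_time_recursive a b t) ∨
      (pvInnerLoop t g (j - g + 1) a0 cost = none ∧
        ∃ a b : Int, i ≤ a ∧ a < b ∧ b ≤ j ∧ sm_min_time_recursive a b t = none) := by
  intro n
  induction n with
  | zero =>
    intro a0 cost hn hia0 hinv
    rw [pvInnerLoop, if_neg (by omega : ¬ a0 < j - g + 1)]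
    exact Or.inl ⟨cost, rfl, fun a b ha hab hbj hgap =>
      hinv a b ha hab hbj (by omega)⟩
  | succ n ih =>
    intro a0 cost hn hia0 hinv
    by_cases hend : a0 < j - g + 1
    · rw [pvInnerLoop, if_pos hend]
      have hcell : pvCell t cost a0 (a0 + g) = sm_min_time_recursive a0 (a0 + g) t := by
        apply pvCell_eq t cost a0 (a0 + g) (by omega)
        intro k hk1 hk2
        constructor
        · exact hinv a0 k hia0 hk1 (by omega) (by omega)
        · exact hinv k (a0 + g) (by omega) hk2 (by omega) (by omega)
      rw [hcell]
      cases hval : sm_min_time_recursive a0 (a0 + g) t with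
      | none =>
        exact Or.inr ⟨rfl, a0, a0 + g, hia0, by omega, by omega, hval⟩
      | some v =>
        apply ih (a0 + 1) _ (by omega) (by omega)
        intro a b ha hab hbj hcase
        rw [PySem.Dict.get?_insert]
        by_cases hkey : (a, b) = (a0, a0 + g)
        · rw [if_pos hkey]
          obtain ⟨h1', h2'⟩ := Prod.mk.inj hkey
          subst h1'; subst h2'
          exact hval.symm
        · rw [if_neg hkey]
          apply hinv a b ha hab hbj
          rcases hcase with h | ⟨h1', h2'⟩
          · exact Or.inl h
          · refine Or.inr ⟨h1', ?_⟩
            have haa : ¬ a = a0 := by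
              intro haa
              exact hkey (by subst haa; rw [show b = a + g from by omega])
            omega
    · rw [pvInnerLoop, if_neg hend]
      exact Or.inl ⟨cost, rfl, fun a b ha hab hbj hgap =>
        hinv a b ha hab hbj (by omega)⟩

-- the outer loop over gaps g0 … j-i: same disjunction, invariant pushed through
lemma pvOuter (t : List (List Int)) (i j : Int) (hij : i + 2 ≤ j) :
    ∀ (n : ℕ) (g0 : Int) (cost : PySem.Dict (Int × Int) Int),
      (j - i + 1 - g0).toNat ≤ n → 1 ≤ g0 →
      (∀ a b : Int, i ≤ a → a < b → b ≤ j → b - a < g0 →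
        cost.get? (a, b) = sm_min_time_recursive a b t) →
      (∃ cost', pvOuterLoop t i j g0 cost = some cost' ∧
        cost'.get? (i, j) = sm_min_time_recursive i j t) ∨
      (pvOuterLoop t i j g0 cost = none ∧
        ∃ a b : Int, i ≤ a ∧ a < b ∧ b ≤ j ∧ sm_min_time_recursive a b t = none) := by
  intro n
  induction n with
  | zero =>
    intro g0 cost hn hg0 hinv
    rw [pvOuterLoop, if_neg (by omega : ¬ g0 < j - i + 1)]
    exact Or.inl ⟨cost, rfl, hinv i j le_rfl (by omega) le_rfl (by omega)⟩
  | succ n ih =>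
    intro g0 cost hn hg0 hinv
    by_cases hend : g0 < j - i + 1
    · rw [pvOuterLoop, if_pos hend]
      rcases pvInner t i j g0 hg0 ((j - g0 + 1 - i).toNat) i cost le_rfl le_rfl
          (fun a b ha hab hbj hcase => hinv a b ha hab hbj (by omega)) with
        ⟨cost', heq, hinv'⟩ | ⟨heq, hbad⟩
      · rw [heq]
        exact ih (g0 + 1) cost' (by omega) (by omega)
          (fun a b ha hab hbj hgap => hinv' a b ha hab hbj (by omega))
      · rw [heq]
        exact Or.inr ⟨rfl, hbad⟩
    · rw [pvOuterLoop, if_neg hend]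
      exact Or.inl ⟨cost, rfl, hinv i j le_rfl (by omega) le_rfl (by omega)⟩

-- ===== VERDICT (by name: the statement is the Claim_ definition above) =====
theorem sm_min_time_recursive_spec : Claim_equal_sm_min_time_recursive := by
  unfold Claim_equal_sm_min_time_recursive Spec_sm_min_time_recursive
  intro i j t _ _
  unfold sm_min_time_recursive_alt
  by_cases h1 : i = j
  · rw [if_pos h1, sm_min_time_recursive, if_pos h1]
  · rw [if_neg h1]
    by_cases h2 : j ≤ i + 1
    · rw [if_pos h2]
      by_cases h3 : i + 1 = j
      · rw [sm_min_time_recursive, if_neg h1, if_pos h3]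
      · rw [pvA_unfold i j t h1 h3, PySem.List.pyRange_one_eq_nil (by omega)]
        cases pvGet2 t i j <;> rfl
    · rw [if_neg h2]
      rcases pvOuter t i j (by omega) ((j - i).toNat) 1 PySem.Dict.empty (by omega) le_rfl
          (fun a b _ hab _ hgap => by omega) with
        ⟨cost', heq, hval⟩ | ⟨heq, a, b, ha, hab, hbj, hnone⟩
      · rw [heq]
        exact hval.symm
      · rw [heq]
        exact (pvA_none_up t ((j - i).toNat) i j a b (by omega) ha hab hbj hnone)
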